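-- pv_equiv track=rewrite | github.com/pomalb/SUALBSP_Paper | python/results_batch.py | _clean_previous_result_blocks
-- ===== SOURCE A (Python) =====
-- def _clean_previous_result_blocks(lines: list[str]) -> list[str]:
--     marker_prefixes = ("<Lower Bounds>", "<Optimal Stations (Iterations:")
--     cleaned: list[str] = []
--     skip_block = False
--
--     for line in lines:
--         stripped = line.strip()
--         if any(stripped.startswith(prefix) for prefix in marker_prefixes):
--             skip_block = True
--             continue
--         if skip_block:
--             if stripped == "":
--                 skip_block = False
--             continue
--         cleaned.append(line)
--
--     while cleaned and cleaned[-1].strip() == "":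
--         cleaned.pop()
--     return cleaned
-- ===== SOURCE B (Python) =====
-- def _clean_previous_result_blocks(lines: list[str]) -> list[str]:
--     marker_prefixes = ("<Lower Bounds>", "<Optimal Stations (Iterations:")
--     cleaned: list[str] = []
--     it = iter(lines)
--     for line in it:
--         if line.strip().startswith(marker_prefixes):
--             # consume the block: everything up to and including the first blank line
--             for inner in it:
--                 if inner.strip() == "":
--                     break
--         else:
--             cleaned.append(line)
--     while cleaned and cleaned[-1].strip() == "":
--         cleaned.pop()
--     return cleaned
-- ===== Notes on version B (the rewrite author's own statement) =====
-- stated objective: idiomatic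
-- what changed: Replaces A's carried skip_block boolean with a nested loop that consumes each marker block (through its terminating blank line) from a shared iterator, using str.startswith's tuple form; no state flag survives across iterations.
import Mathlib
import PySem

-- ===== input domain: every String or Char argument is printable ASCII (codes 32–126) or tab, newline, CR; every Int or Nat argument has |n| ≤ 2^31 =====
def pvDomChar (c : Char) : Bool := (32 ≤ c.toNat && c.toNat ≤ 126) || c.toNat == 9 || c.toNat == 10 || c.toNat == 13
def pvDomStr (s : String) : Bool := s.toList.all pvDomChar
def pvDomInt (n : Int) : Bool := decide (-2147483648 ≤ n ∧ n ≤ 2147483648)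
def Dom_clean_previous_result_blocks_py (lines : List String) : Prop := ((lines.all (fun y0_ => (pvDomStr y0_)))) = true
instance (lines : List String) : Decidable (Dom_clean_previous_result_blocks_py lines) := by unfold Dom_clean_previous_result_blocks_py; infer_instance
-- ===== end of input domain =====

-- B replaces A's carried skip_block flag by a nested loop that consumes the block
-- (up to and including its terminating blank line) from a shared iterator; objective: idiomatic.

-- shared by both Pythons verbatim: the marker test and the trailing-blank pop loop
def pvIsMarker (stripped : String) : Bool :=
  PySem.Str.startswith stripped "<Lower Bounds>" ||
  PySem.Str.startswith stripped "<Optimal Stations (Iterations:"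

-- 'while cleaned and cleaned[-1].strip() == "": cleaned.pop()' (identical in A and B)
def pvRtrim (cleaned : List String) : List String :=
  (cleaned.reverse.dropWhile (fun l => PySem.Str.strip l == "")).reverse

-- ===== PORT A =====
-- the for-loop carrying (cleaned, skip_block)
def pvALoop : List String → List String → Bool → List String
  | [], cleaned, _ => cleaned
  | line :: rest, cleaned, skip_block =>
    let stripped := PySem.Str.strip line
    if pvIsMarker stripped then pvALoop rest cleaned true
    else if skip_block then pvALoop rest cleaned (!(stripped == ""))
    else pvALoop rest (cleaned ++ [line]) skip_block

def clean_previous_result_blocks_py (lines : List String) : List String :=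
  pvRtrim (pvALoop lines [] false)

-- ===== PORT B =====
-- the inner 'for inner in it: if inner.strip() == "": break' — consumes through the first blank line
def pvBDrop : List String → List String
  | [] => []
  | inner :: rest => if PySem.Str.strip inner == "" then rest else pvBDrop rest

theorem pvBDrop_length_le (xs : List String) : (pvBDrop xs).length ≤ xs.length := by
  induction xs with
  | nil => simp [pvBDrop]
  | cons x r ih => simp only [pvBDrop]; split <;> simp; omega

-- the outer 'for line in it'
def pvBGo : List String → List String
  | [] => []
  | line :: rest =>
    if pvIsMarker (PySem.Str.strip line) then pvBGo (pvBDrop rest)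
    else line :: pvBGo rest
termination_by xs => xs.length
decreasing_by
· exact Nat.lt_succ_of_le (pvBDrop_length_le rest)
· simp

def clean_previous_result_blocks_py_alt (lines : List String) : List String :=
  pvRtrim (pvBGo lines)

-- ===== PRECONDITION & SPEC =====
def Spec_clean_previous_result_blocks_py (lines : List String) (out : List String) : Prop := out = clean_previous_result_blocks_py_alt lines
instance (lines : List String) (out : List String) : Decidable (Spec_clean_previous_result_blocks_py lines out) := by unfold Spec_clean_previous_result_blocks_py; infer_instance

-- ===== CLAIM (what is proved, stated in full; the proofs are below) =====
def Claim_equal_clean_previous_result_blocks_py : Prop := ∀ (lines : List String), Dom_clean_previous_result_blocks_py lines → Spec_clean_previous_result_blocks_py lines (clean_previous_result_blocks_py lines)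

-- ===== LEMMAS AND PROOFS =====

theorem pvMarker_not_blank {s : String} (h : pvIsMarker s = true) : (s == "") = false := by
  cases hb : (s == "") with
  | false => rfl
  | true =>
    have : s = "" := eq_of_beq hb
    subst this
    exact absurd h (by decide)

-- loop invariant: A's fold with skip_block = false produces acc ++ B's result,
-- and with skip_block = true it produces acc ++ B's result on the list past the block.
theorem pvLoop_key (lines : List String) :
    (∀ acc, pvALoop lines acc false = acc ++ pvBGo lines) ∧
    (∀ acc, pvALoop lines acc true = acc ++ pvBGo (pvBDrop lines)) := by
  induction lines with
  | nil => simp [pvALoop, pvBGo, pvBDrop]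
  | cons l r ih =>
    by_cases hm : pvIsMarker (PySem.Str.strip l) = true
    · constructor <;> intro acc
      · rw [pvALoop, pvBGo]
        simp only [hm, if_pos]
        exact ih.2 acc
      · rw [pvALoop]
        simp only [hm, if_true]
        rw [pvBDrop]
        simp only [pvMarker_not_blank hm, if_neg, Bool.false_eq_true, not_false_iff]
        exact ih.2 acc
    · rw [Bool.not_eq_true] at hm
      constructor <;> intro acc
      · rw [pvALoop, pvBGo]
        simp only [hm, Bool.false_eq_true, if_neg, not_false_iff]
        rw [ih.1 (acc ++ [l])]
        simp
      · rw [pvALoop, pvBDrop]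
        simp only [hm, Bool.false_eq_true, if_false]
        cases hb : (PySem.Str.strip l == "") with
        | true => simpa using ih.1 acc
        | false => simpa using ih.2 acc

-- ===== VERDICT (by name: the statement is the Claim_ definition above) =====
theorem clean_previous_result_blocks_py_spec : Claim_equal_clean_previous_result_blocks_py := by
  intro lines _
  unfold Spec_clean_previous_result_blocks_py clean_previous_result_blocks_py clean_previous_result_blocks_py_alt
  rw [(pvLoop_key lines).1 []]
  simp
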